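-- pv_equiv track=rewrite | github.com/RosterBot/platform | lib/AWS/vpc.py | calculate_cidr_prefix
-- ===== SOURCE A (Python) =====
-- def calculate_cidr_prefix(num_of_ips):
--     # brute force method for determining prefix
--     # taken from zytrax.org
--     p = 1
--     n = int(num_of_ips)
--     i = 0
--     while p < n:
--         p *= 2
--         i += 1
--     prefix = 32 - i
--     return prefix
-- ===== SOURCE B (Python) =====
-- def calculate_cidr_prefix(num_of_ips):
--     # closed form: smallest i with 2**i >= n is (n-1).bit_length() for n > 1
--     n = int(num_of_ips)
--     i = 0 if n <= 1 else (n - 1).bit_length()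
--     return 32 - i
-- ===== Notes on version B (the rewrite author's own statement) =====
-- stated objective: idiomatic
-- what changed: The doubling while-loop is replaced by a closed-form bit_length expression: i = 0 if n <= 1 else (n-1).bit_length().
import Mathlib
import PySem

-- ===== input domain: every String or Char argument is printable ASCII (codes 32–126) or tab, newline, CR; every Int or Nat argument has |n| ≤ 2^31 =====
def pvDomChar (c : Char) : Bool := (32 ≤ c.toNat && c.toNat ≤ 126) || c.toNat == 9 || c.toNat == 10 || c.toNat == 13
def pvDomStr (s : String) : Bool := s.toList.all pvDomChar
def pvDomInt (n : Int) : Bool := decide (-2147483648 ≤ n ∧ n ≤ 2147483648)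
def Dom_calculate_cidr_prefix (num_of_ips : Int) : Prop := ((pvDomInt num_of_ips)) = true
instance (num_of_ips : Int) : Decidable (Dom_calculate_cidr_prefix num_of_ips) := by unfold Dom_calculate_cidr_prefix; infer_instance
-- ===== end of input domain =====

-- B replaces A's doubling while-loop by a closed-form bit_length expression (idiomatic).

-- ===== PORT A =====
-- the 'while p < n' loop; fuel is a totality guard only (64 suffices on the domain |n| ≤ 2^31)
def cidrLoopA : Nat → Int → Int → Int → Int
  | 0, _, _, i => i
  | f + 1, n, p, i => if p < n then cidrLoopA f n (p * 2) (i + 1) else i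

def calculate_cidr_prefix (num_of_ips : Int) : Int :=
  -- n = int(num_of_ips): identity on an int argument
  32 - cidrLoopA 64 num_of_ips 1 0

-- ===== PORT B =====
-- (n - 1).bit_length() for a nonnegative Python int is Nat.size
def calculate_cidr_prefix_alt (num_of_ips : Int) : Int :=
  -- n = int(num_of_ips): identity on an int argument
  32 - (if num_of_ips ≤ 1 then 0 else ((num_of_ips - 1).toNat.size : Int))

-- ===== PRECONDITION & SPEC =====
def Spec_calculate_cidr_prefix (num_of_ips : Int) (out : Int) : Prop := out = calculate_cidr_prefix_alt num_of_ips
instance (num_of_ips : Int) (out : Int) : Decidable (Spec_calculate_cidr_prefix num_of_ips out) := by unfold Spec_calculate_cidr_prefix; infer_instance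

-- ===== CLAIM (what is proved, stated in full; the proofs are below) =====
def Claim_equal_calculate_cidr_prefix : Prop := ∀ (num_of_ips : Int), Dom_calculate_cidr_prefix num_of_ips → Spec_calculate_cidr_prefix num_of_ips (calculate_cidr_prefix num_of_ips)

-- ===== LEMMAS AND PROOFS =====

-- loop invariant: started at p = 2^j with enough fuel, the loop adds Nat.size (n-1).toNat - j
theorem cidrLoopA_eq (n : Int) (h2 : 2 ≤ n) :
    ∀ (f j : Nat) (i : Int), (n - 1).toNat.size ≤ j + f →
      cidrLoopA f n ((2 : Int) ^ j) i = i + (((n - 1).toNat.size - j : Nat) : Int) := by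
  intro f
  induction f with
  | zero =>
      intro j i hle
      have h0 : (n - 1).toNat.size - j = 0 := by omega
      simp only [cidrLoopA, h0, Nat.cast_zero, add_zero]
  | succ f ih =>
      intro j i hle
      by_cases h : (2 : Int) ^ j < n
      · have hstep : cidrLoopA (f + 1) n ((2 : Int) ^ j) i
            = cidrLoopA f n ((2 : Int) ^ j * 2) (i + 1) := by
          simp [cidrLoopA, h]
        have hpow : (2 : Int) ^ j * 2 = (2 : Int) ^ (j + 1) := by ring
        -- 2^j < n  ↔  2^j ≤ (n-1).toNat  ↔  j < size (n-1).toNat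
        have hj : j < (n - 1).toNat.size := by
          have h1 : (2 : Int) ^ j ≤ n - 1 := by omega
          have hcast : ((2 ^ j : Nat) : Int) = (2 : Int) ^ j := by push_cast; ring
          have h2' : (2 ^ j : Nat) ≤ (n - 1).toNat := by omega
          exact Nat.lt_size.mpr h2'
        have hrec := ih (j + 1) (i + 1) (by omega)
        rw [hstep, hpow, hrec]
        have : ((n - 1).toNat.size - (j + 1) : Nat) + 1 = ((n - 1).toNat.size - j : Nat) := by
          omega
        push_cast [← this]
        ring
      · have hstop : cidrLoopA (f + 1) n ((2 : Int) ^ j) i = i := by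
          simp [cidrLoopA, h]
        have hj : (n - 1).toNat.size ≤ j := by
          have h1 : n - 1 < (2 : Int) ^ j := by omega
          have hcast : ((2 ^ j : Nat) : Int) = (2 : Int) ^ j := by push_cast; ring
          have h2' : (n - 1).toNat < (2 ^ j : Nat) := by omega
          exact Nat.size_le.mpr h2'
        have h0 : (n - 1).toNat.size - j = 0 := by omega
        simp only [hstop, h0, Nat.cast_zero, add_zero]

-- ===== VERDICT (by name: the statement is the Claim_ definition above) =====
theorem calculate_cidr_prefix_spec : Claim_equal_calculate_cidr_prefix := by
  intro n hdom
  unfold Spec_calculate_cidr_prefix calculate_cidr_prefix calculate_cidr_prefix_alt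
  have hdom' : -2147483648 ≤ n ∧ n ≤ 2147483648 := by
    simpa [Dom_calculate_cidr_prefix, pvDomInt] using hdom
  by_cases h1 : n ≤ 1
  · have : ¬ ((1 : Int) < n) := by omega
    simp [cidrLoopA, this, h1]
  · have h2 : 2 ≤ n := by omega
    have hsize : (n - 1).toNat.size ≤ 64 := by
      apply Nat.size_le.mpr
      have : (n - 1).toNat ≤ 2147483647 := by omega
      calc (n - 1).toNat ≤ 2147483647 := this
        _ < 2 ^ 64 := by norm_num
    have := cidrLoopA_eq n h2 64 0 0 (by omega)
    simp only [pow_zero] at this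
    rw [this]
    simp [h1]
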